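-- pv_equiv track=rewrite | github.com/haomingkoo/trader-koo | trader_koo/backend/services/database.py | _yolo_streak_for_asofs
-- ===== SOURCE A (Python) =====
-- def _yolo_streak_for_asofs(
--     seen_asofs: set[str],
--     asof_dates_desc: list[str],
--     latest_asof: str | None,
-- ) -> int:
--     """Count consecutive as-of dates where a pattern was seen."""
--     if not latest_asof:
--         return 0
--     streak = 0
--     started = False
--     for asof in asof_dates_desc:
--         if not started:
--             if asof != latest_asof:
--                 continue
--             started = True
--         if asof in seen_asofs:
--             streak += 1
--         else:
--             break
--     return streak
-- ===== SOURCE B (Python) =====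
-- def _yolo_streak_for_asofs(
--     seen_asofs: set[str],
--     asof_dates_desc: list[str],
--     latest_asof: str | None,
-- ) -> int:
--     """Count consecutive as-of dates where a pattern was seen."""
--     if not latest_asof:
--         return 0
--     streak = 0
--     run = 0
--     for asof in reversed(asof_dates_desc):
--         run = run + 1 if asof in seen_asofs else 0
--         if asof == latest_asof:
--             streak = run
--     return streak
-- ===== Notes on version B (the rewrite author's own statement) =====
-- stated objective: alternative
-- what changed: Replaces A's forward scan with started-flag and break by a single reverse-order run-length DP pass: run counts the current streak of seen dates starting at each position, and the answer is recorded whenever the date equals latest_asof (the last recording, i.e. the first occurrence forward, wins).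
import Mathlib
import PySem

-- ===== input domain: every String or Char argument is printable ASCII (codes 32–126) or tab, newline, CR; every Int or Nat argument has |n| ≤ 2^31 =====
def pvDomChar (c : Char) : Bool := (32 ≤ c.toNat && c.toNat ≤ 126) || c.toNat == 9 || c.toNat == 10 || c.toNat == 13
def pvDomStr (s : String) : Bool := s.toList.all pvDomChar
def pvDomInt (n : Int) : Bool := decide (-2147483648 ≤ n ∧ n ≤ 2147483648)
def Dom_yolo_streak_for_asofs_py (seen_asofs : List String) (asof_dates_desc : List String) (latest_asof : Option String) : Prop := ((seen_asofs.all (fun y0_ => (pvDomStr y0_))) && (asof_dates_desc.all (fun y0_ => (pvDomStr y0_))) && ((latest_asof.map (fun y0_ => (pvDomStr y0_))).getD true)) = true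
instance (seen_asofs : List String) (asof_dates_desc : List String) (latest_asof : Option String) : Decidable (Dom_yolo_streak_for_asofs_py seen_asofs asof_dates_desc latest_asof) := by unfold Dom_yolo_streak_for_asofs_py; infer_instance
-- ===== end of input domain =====

-- B replaces A's forward started-flag scan (with break) by a reverse-order run-length DP pass; same return value everywhere.


-- ===== PORT A =====
-- the for-loop with its 'streak'/'started' state and 'break' (break = return the accumulator)
def yoloLoopA (seen : List String) (latest : String) : List String → Int → Bool → Int
  | [], streak, _ => streak
  | asof :: rest, streak, started =>
    if !started && asof ≠ latest then
      yoloLoopA seen latest rest streak started      -- 'continue'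
    else if seen.contains asof then
      yoloLoopA seen latest rest (streak + 1) true
    else
      streak                                          -- 'break'

def yolo_streak_for_asofs_py (seen_asofs : List String) (asof_dates_desc : List String) (latest_asof : Option String) : Int :=
  match latest_asof with
  | none => 0                                         -- 'if not latest_asof'
  | some s => if s = "" then 0 else yoloLoopA seen_asofs s asof_dates_desc 0 false

-- ===== PORT B =====
-- one step of the reverse pass: state (run, streak); run = current streak of seen dates, streak overwritten at each match
def yoloStepB (seen : List String) (latest : String) (st : Int × Int) (asof : String) : Int × Int :=
  let run := if seen.contains asof then st.1 + 1 else 0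
  (run, if asof = latest then run else st.2)

def yolo_streak_for_asofs_py_alt (seen_asofs : List String) (asof_dates_desc : List String) (latest_asof : Option String) : Int :=
  match latest_asof with
  | none => 0
  | some s =>
    if s = "" then 0 else
    (asof_dates_desc.reverse.foldl (yoloStepB seen_asofs s) (0, 0)).2   -- for asof in reversed(...)

-- ===== PRECONDITION & SPEC =====
def Spec_yolo_streak_for_asofs_py (seen_asofs : List String) (asof_dates_desc : List String) (latest_asof : Option String) (out : Int) : Prop := out = yolo_streak_for_asofs_py_alt seen_asofs asof_dates_desc latest_asof
instance (seen_asofs : List String) (asof_dates_desc : List String) (latest_asof : Option String) (out : Int) : Decidable (Spec_yolo_streak_for_asofs_py seen_asofs asof_dates_desc latest_asof out) := by unfold Spec_yolo_streak_for_asofs_py; infer_instance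

-- ===== CLAIM =====
def Claim_equal_yolo_streak_for_asofs_py : Prop := ∀ (seen_asofs : List String) (asof_dates_desc : List String) (latest_asof : Option String), Dom_yolo_streak_for_asofs_py seen_asofs asof_dates_desc latest_asof → Spec_yolo_streak_for_asofs_py seen_asofs asof_dates_desc latest_asof (yolo_streak_for_asofs_py seen_asofs asof_dates_desc latest_asof)

-- ===== LEMMAS AND PROOFS =====

-- proof-side recursive views of B's fold: the run-length at the front, and the recorded answer
def yoloRun (seen : List String) : List String → Int
  | [] => 0
  | asof :: rest => if seen.contains asof then yoloRun seen rest + 1 else 0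

def yoloAns (seen : List String) (latest : String) : List String → Int
  | [] => 0
  | asof :: rest => if asof = latest then yoloRun seen (asof :: rest) else yoloAns seen latest rest

-- B's fold over the reversed list computes (yoloRun, yoloAns)
theorem yoloFoldB_eq (seen : List String) (latest : String) :
    ∀ xs : List String,
      xs.reverse.foldl (yoloStepB seen latest) (0, 0) = (yoloRun seen xs, yoloAns seen latest xs) := by
  intro xs
  induction xs with
  | nil => rfl
  | cons a rest ih =>
    have : (a :: rest).reverse.foldl (yoloStepB seen latest) (0, 0)
        = yoloStepB seen latest (rest.reverse.foldl (yoloStepB seen latest) (0, 0)) a := by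
      simp [List.foldl_append]
    rw [this, ih]
    by_cases h : a ∈ seen <;> by_cases hl : a = latest <;>
      simp [yoloStepB, yoloRun, yoloAns, h, hl]

-- once started, A's loop adds the run-length of the remaining suffix
theorem yoloLoopA_started (seen : List String) (latest : String) :
    ∀ (xs : List String) (streak : Int),
      yoloLoopA seen latest xs streak true = streak + yoloRun seen xs := by
  intro xs
  induction xs with
  | nil => intro streak; simp [yoloLoopA, yoloRun]
  | cons a rest ih =>
    intro streak
    by_cases h : a ∈ seen <;> simp [yoloLoopA, yoloRun, h, ih] <;> omega

-- before starting, A's loop computes B's recorded answer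
theorem yoloLoopA_unstarted (seen : List String) (latest : String) :
    ∀ (xs : List String) (streak : Int),
      yoloLoopA seen latest xs streak false = streak + yoloAns seen latest xs := by
  intro xs
  induction xs with
  | nil => intro streak; simp [yoloLoopA, yoloAns]
  | cons a rest ih =>
    intro streak
    by_cases hl : a = latest
    · subst hl
      by_cases h : a ∈ seen
      · simp [yoloLoopA, yoloLoopA_started, yoloAns, yoloRun, h]; ring
      · simp [yoloLoopA, yoloAns, yoloRun, h]
    · have : yoloLoopA seen latest (a :: rest) streak false
           = yoloLoopA seen latest rest streak false := by
        simp [yoloLoopA, hl]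
      rw [this, ih]
      simp [yoloAns, hl]

-- ===== VERDICT =====
theorem yolo_streak_for_asofs_py_spec : Claim_equal_yolo_streak_for_asofs_py := by
  intro seen asofs latest _
  unfold Spec_yolo_streak_for_asofs_py yolo_streak_for_asofs_py yolo_streak_for_asofs_py_alt
  cases latest with
  | none => rfl
  | some s =>
    by_cases hs : s = ""
    · simp [hs]
    · simp only [hs, if_false]
      rw [yoloLoopA_unstarted, yoloFoldB_eq]
      ring
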